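-- pv_equiv track=rewrite | github.com/VITAMIN-organisation/vitamin-model-checker | model_checker/benchmarking/generators.py | generate_linear_chain_model
-- ===== SOURCE A (Python) =====
-- NL = "\n"
--
-- def _state_names(num_states):
--     return [f"s{i}" for i in range(num_states)]
--
-- def _unknown_transitions_grid(num_states):
--     row = " ".join(["0"] * num_states)
--     return [row] * num_states
--
-- def _format_cgs_body(
--     transitions,
--     unknown_transitions,
--     states,
--     atomic_propositions,
--     labelling,
--     num_agents,
--     costs_for_actions=None,
--     extra_after_labelling=None,
-- ):
--     parts = [
--         "Transition",
--         NL.join(transitions),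
--         "Unknown_Transition_by",
--         NL.join(unknown_transitions),
--         "Name_State",
--         " ".join(states),
--         "Initial_State",
--         "s0",
--     ]
--     if costs_for_actions is not None:
--         parts.append("Costs_for_actions")
--         parts.append(costs_for_actions)
--     parts.extend(
--         [
--             "Atomic_propositions",
--             atomic_propositions,
--             "Labelling",
--             NL.join(labelling),
--         ]
--     )
--     if extra_after_labelling:
--         parts.append(extra_after_labelling)
--     parts.extend(["Number_of_agents", str(num_agents)])
--     return NL.join(parts) + NL
--
-- def generate_linear_chain_model(
--     num_states, num_agents=2, prop_names=None, dense_p=False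
-- ):
--     if prop_names is None:
--         prop_names = ["p"]
--
--     states = _state_names(num_states)
--     transitions = []
--     unknown_transitions = _unknown_transitions_grid(num_states)
--
--     for i in range(num_states):
--         row = []
--         for j in range(num_states):
--             if j == i + 1:
--                 action = "AC" * num_agents
--                 row.append(action)
--             elif j == i:
--                 row.append("*" if (i == num_states - 1) else "0")
--             else:
--                 row.append("0")
--         transitions.append(" ".join(row))
--
--     labelling = []
--     for i in range(num_states):
--         row = []
--         for prop in prop_names:
--             if prop == "p":
--                 if dense_p:
--                     row.append("1" if i < num_states - 1 else "0")
--                 else: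
--                     row.append("1" if (i == 0 or i == num_states - 1) else "0")
--             elif prop == "q":
--                 row.append("1" if i == num_states - 1 else "0")
--             else:
--                 row.append("0")
--         labelling.append(" ".join(row))
--
--     return _format_cgs_body(
--         transitions,
--         unknown_transitions,
--         states,
--         " ".join(prop_names),
--         labelling,
--         num_agents,
--     )
-- ===== SOURCE B (Python) =====
-- def generate_linear_chain_model(num_states, num_agents=2, prop_names=None, dense_p=False):
--     props = ["p"] if prop_names is None else prop_names
--     n = num_states
--
--     # Row i of the transition matrix as a closed-form string: i (or i+1) zeros,
--     # then '*' (last state) or the joint action followed by trailing zeros.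
--     def trans_row(i):
--         if i == n - 1:
--             return "0 " * i + "*"
--         return "0 " * (i + 1) + "AC" * num_agents + " 0" * (n - i - 2)
--
--     # The labelling has at most three distinct rows (first / middle / last state):
--     # compute each template once and replicate, instead of re-deriving bits per state.
--     def label_row(first, last):
--         bits = []
--         for prop in props:
--             if prop == "p":
--                 hit = (not last) if dense_p else (first or last)
--             elif prop == "q":
--                 hit = last
--             else:
--                 hit = False
--             bits.append("1" if hit else "0")
--         return " ".join(bits)
--
--     if n <= 0:
--         labelling = []
--     elif n == 1:
--         labelling = [label_row(True, True)]
--     else: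
--         labelling = ([label_row(True, False)]
--                      + [label_row(False, False)] * (n - 2)
--                      + [label_row(False, True)])
--
--     zero_row = "0" + " 0" * (n - 1) if n > 0 else ""
--     return (
--         "Transition\n"
--         + "\n".join(trans_row(i) for i in range(n)) + "\n"
--         + "Unknown_Transition_by\n"
--         + "\n".join([zero_row] * n) + "\n"
--         + "Name_State\n"
--         + " ".join("s%d" % i for i in range(n)) + "\n"
--         + "Initial_State\ns0\n"
--         + "Atomic_propositions\n"
--         + " ".join(props) + "\n"
--         + "Labelling\n"
--         + "\n".join(labelling) + "\n"
--         + "Number_of_agents\n"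
--         + str(num_agents) + "\n"
--     )
-- ===== Notes on version B (the rewrite author's own statement) =====
-- stated objective: alternative
-- what changed: Transition rows are produced as closed-form strings by string repetition (prefix zeros + action/star + suffix zeros) with no per-cell loop or list at all; the labelling is computed as at most three template rows (first/middle/last state) replicated, instead of re-deriving the bits for every state; the body is assembled by direct string concatenation instead of joining a parts list.
import Mathlib
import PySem

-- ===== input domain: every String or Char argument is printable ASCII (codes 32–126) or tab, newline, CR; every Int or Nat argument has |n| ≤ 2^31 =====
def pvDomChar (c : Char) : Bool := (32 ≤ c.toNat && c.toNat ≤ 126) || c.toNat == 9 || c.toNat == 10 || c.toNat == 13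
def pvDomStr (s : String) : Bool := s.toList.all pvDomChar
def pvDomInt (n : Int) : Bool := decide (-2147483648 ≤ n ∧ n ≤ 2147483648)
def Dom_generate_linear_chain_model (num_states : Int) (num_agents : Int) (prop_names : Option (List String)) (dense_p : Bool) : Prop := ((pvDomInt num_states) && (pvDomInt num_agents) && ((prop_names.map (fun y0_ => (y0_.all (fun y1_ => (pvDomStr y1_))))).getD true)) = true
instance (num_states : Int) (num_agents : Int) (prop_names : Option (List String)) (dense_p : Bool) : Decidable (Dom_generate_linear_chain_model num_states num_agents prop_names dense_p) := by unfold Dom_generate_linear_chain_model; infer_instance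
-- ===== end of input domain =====

-- B builds each transition row as one closed-form string by repetition, computes the labelling as
-- at most three template rows replicated, and assembles the body by direct concatenation; same output.

-- Python "str" * int (string repetition; exact: empty for a non-positive count)
def pvStrRepeat (s : String) (n : Int) : String :=
  String.ofList (PySem.List.pyRepeat s.toList n)

-- ===== PORT A =====
def pvNL : String := "\n"

-- _state_names: [f"s{i}" for i in range(num_states)]
def pv_state_names (num_states : Int) : List String :=
  (PySem.List.pyRange 0 num_states 1).map (fun i => "s" ++ PySem.Int.toStr i)

-- _unknown_transitions_grid
def pv_unknown_transitions_grid (num_states : Int) : List String :=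
  let row := PySem.Str.join " " (PySem.List.pyRepeat ["0"] num_states)
  PySem.List.pyRepeat [row] num_states

-- _format_cgs_body (costs_for_actions / extra_after_labelling are optional; 'if extra:' is
-- Python truthiness on a str-or-None, i.e. some non-empty string)
def pv_format_cgs_body (transitions unknown_transitions states : List String)
    (atomic_propositions : String) (labelling : List String) (num_agents : Int)
    (costs_for_actions : Option String) (extra_after_labelling : Option String) : String :=
  let parts := ["Transition", PySem.Str.join pvNL transitions,
                "Unknown_Transition_by", PySem.Str.join pvNL unknown_transitions,
                "Name_State", PySem.Str.join " " states,
                "Initial_State", "s0"]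
  let parts := match costs_for_actions with
    | some c => parts ++ ["Costs_for_actions", c]
    | none => parts
  let parts := parts ++ ["Atomic_propositions", atomic_propositions,
                         "Labelling", PySem.Str.join pvNL labelling]
  let parts := match extra_after_labelling with
    | some e => if e ≠ "" then parts ++ [e] else parts
    | none => parts
  let parts := parts ++ ["Number_of_agents", PySem.Int.toStr num_agents]
  PySem.Str.join pvNL parts ++ pvNL

def generate_linear_chain_model (num_states : Int) (num_agents : Int) (prop_names : Option (List String)) (dense_p : Bool) : String :=
  let props := match prop_names with
    | none => ["p"]
    | some ps => ps
  let states := pv_state_names num_states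
  let unknown_transitions := pv_unknown_transitions_grid num_states
  let transitions := (PySem.List.pyRange 0 num_states 1).foldl (fun acc i =>
      let row := (PySem.List.pyRange 0 num_states 1).foldl (fun r j =>
          if j == i + 1 then
            r ++ [pvStrRepeat "AC" num_agents]
          else if j == i then
            r ++ [if i == num_states - 1 then "*" else "0"]
          else
            r ++ ["0"]) []
      acc ++ [PySem.Str.join " " row]) []
  let labelling := (PySem.List.pyRange 0 num_states 1).foldl (fun acc i =>
      let row := props.foldl (fun r prop =>
          if prop == "p" then
            (if dense_p then
              r ++ [if i < num_states - 1 then "1" else "0"]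
            else
              r ++ [if i == 0 || i == num_states - 1 then "1" else "0"])
          else if prop == "q" then
            r ++ [if i == num_states - 1 then "1" else "0"]
          else
            r ++ ["0"]) []
      acc ++ [PySem.Str.join " " row]) []
  pv_format_cgs_body transitions unknown_transitions states (PySem.Str.join " " props)
    labelling num_agents none none

-- ===== PORT B =====
-- trans_row(i): closed-form row string by repetition
def pvTransRow (n : Int) (na : Int) (i : Int) : String :=
  if i == n - 1 then
    pvStrRepeat "0 " i ++ "*"
  else
    pvStrRepeat "0 " (i + 1) ++ pvStrRepeat "AC" na ++ pvStrRepeat " 0" (n - i - 2)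

-- label_row(first, last): one template labelling row
def pvLabelRow (props : List String) (dp : Bool) (first last : Bool) : String :=
  let bits := props.foldl (fun bits prop =>
    let hit := if prop == "p" then (if dp then !last else (first || last))
               else if prop == "q" then last
               else false
    bits ++ [if hit then "1" else "0"]) []
  PySem.Str.join " " bits

def generate_linear_chain_model_alt (num_states : Int) (num_agents : Int) (prop_names : Option (List String)) (dense_p : Bool) : String :=
  let props := match prop_names with
    | none => ["p"]
    | some ps => ps
  let n := num_states
  let labelling :=
    if n ≤ 0 then []
    else if n == 1 then [pvLabelRow props dense_p true true]
    else [pvLabelRow props dense_p true false]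
         ++ PySem.List.pyRepeat [pvLabelRow props dense_p false false] (n - 2)
         ++ [pvLabelRow props dense_p false true]
  let zero_row := if 0 < n then "0" ++ pvStrRepeat " 0" (n - 1) else ""
  "Transition\n"
  ++ PySem.Str.join "\n" ((PySem.List.pyRange 0 n 1).map (pvTransRow n num_agents)) ++ "\n"
  ++ "Unknown_Transition_by\n"
  ++ PySem.Str.join "\n" (PySem.List.pyRepeat [zero_row] n) ++ "\n"
  ++ "Name_State\n"
  ++ PySem.Str.join " " ((PySem.List.pyRange 0 n 1).map (fun i => "s" ++ PySem.Int.toStr i)) ++ "\n"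
  ++ "Initial_State\ns0\n"
  ++ "Atomic_propositions\n"
  ++ PySem.Str.join " " props ++ "\n"
  ++ "Labelling\n"
  ++ PySem.Str.join "\n" labelling ++ "\n"
  ++ "Number_of_agents\n"
  ++ PySem.Int.toStr num_agents ++ "\n"

-- ===== PRECONDITION & SPEC =====
def Spec_generate_linear_chain_model (num_states : Int) (num_agents : Int) (prop_names : Option (List String)) (dense_p : Bool) (out : String) : Prop := out = generate_linear_chain_model_alt num_states num_agents prop_names dense_p
instance (num_states : Int) (num_agents : Int) (prop_names : Option (List String)) (dense_p : Bool) (out : String) : Decidable (Spec_generate_linear_chain_model num_states num_agents prop_names dense_p out) := by unfold Spec_generate_linear_chain_model; infer_instance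

-- ===== CLAIM =====
def Claim_equal_generate_linear_chain_model : Prop := ∀ (num_states : Int) (num_agents : Int) (prop_names : Option (List String)) (dense_p : Bool), Dom_generate_linear_chain_model num_states num_agents prop_names dense_p → Spec_generate_linear_chain_model num_states num_agents prop_names dense_p (generate_linear_chain_model num_states num_agents prop_names dense_p)

-- ===== LEMMAS AND PROOFS =====

theorem pv_join_cons_ne (sep a : List Char) (l : List (List Char)) (hl : l ≠ []) :
    PySem.Chars.join sep (a :: l) = a ++ sep ++ PySem.Chars.join sep l := by
  cases l with
  | nil => exact absurd rfl hl
  | cons b bs => rw [PySem.Chars.join_cons_cons]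

theorem pv_join_rep_prefix (sep a : List Char) (k : Nat) (y : List Char) (ys : List (List Char)) :
    PySem.Chars.join sep (List.replicate k a ++ y :: ys)
      = (List.replicate k (a ++ sep)).flatten ++ PySem.Chars.join sep (y :: ys) := by
  induction k with
  | zero => simp
  | succ k ih =>
    rw [List.replicate_succ, List.cons_append,
        pv_join_cons_ne sep a _ (by simp), ih, List.replicate_succ, List.flatten_cons]
    simp [List.append_assoc]

theorem pv_join_cons_rep (sep y z : List Char) (m : Nat) :
    PySem.Chars.join sep (y :: List.replicate m z)
      = y ++ (List.replicate m (sep ++ z)).flatten := by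
  induction m generalizing y with
  | zero => simp [PySem.Chars.join_singleton]
  | succ m ih =>
    rw [List.replicate_succ, PySem.Chars.join_cons_cons, ih z, List.replicate_succ,
        List.flatten_cons]
    simp [List.append_assoc]

theorem pv_toList_pvStrRepeat (s : String) (n : Int) :
    (pvStrRepeat s n).toList = (List.replicate n.toNat s.toList).flatten := by
  simp [pvStrRepeat, PySem.List.pyRepeat]

theorem pv_strJoin_cons (sep a : String) (l : List String) (hl : l ≠ []) :
    PySem.Str.join sep (a :: l) = a ++ sep ++ PySem.Str.join sep l := by
  unfold PySem.Str.join
  rw [List.map_cons, pv_join_cons_ne _ _ _ (by simpa using hl),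
      String.ofList_append, String.ofList_append, String.ofList_toList, String.ofList_toList]

theorem pv_strJoin_singleton (sep a : String) : PySem.Str.join sep [a] = a := by
  unfold PySem.Str.join
  simp [PySem.Chars.join_singleton]

theorem pv_zero_row (n : Int) :
    PySem.Str.join " " (PySem.List.pyRepeat ["0"] n)
      = if 0 < n then "0" ++ pvStrRepeat " 0" (n - 1) else "" := by
  apply String.toList_inj.mp
  rw [PySem.Str.toList_join, PySem.List.pyRepeat_singleton, List.map_replicate]
  by_cases hn : 0 < n
  · simp only [hn, if_pos]
    obtain ⟨m, hm⟩ : ∃ m, n.toNat = m + 1 := ⟨(n - 1).toNat, by omega⟩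
    rw [hm, List.replicate_succ, pv_join_cons_rep]
    rw [String.toList_append, pv_toList_pvStrRepeat]
    have : (n - 1).toNat = m := by omega
    rw [this]
    rfl
  · simp only [hn]
    have : n.toNat = 0 := by omega
    rw [this]
    rfl

-- element of a prefix-zeros / y / suffix-zeros row
theorem pv_getElem_pat {α : Type} (p q k : Nat) (a y : α) (h : k < p + 1 + q) :
    (List.replicate p a ++ y :: List.replicate q a)[k]'(by
      simp only [List.length_append, List.length_cons, List.length_replicate]; omega)
      = if k = p then y else a := by
  rcases Nat.lt_or_ge k p with hk | hk
  · rw [List.getElem_append_left (by simpa using hk), List.getElem_replicate, if_neg (by omega)]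
  · rw [List.getElem_append_right (by simpa using hk)]
    simp only [List.length_replicate]
    rcases Nat.eq_or_lt_of_le hk with he | hl
    · simp [← he]
    · rw [List.getElem_cons, dif_neg (by omega), if_neg (by omega)]
      exact List.getElem_replicate ..

-- A's inner transition loop yields the row as prefix-zeros / action-or-star / suffix-zeros.
theorem pv_trans_row_list (n na i : Int) (h0 : 0 ≤ i) (hin : i < n) :
    (PySem.List.pyRange 0 n 1).foldl (fun r j =>
        if j == i + 1 then
          r ++ [pvStrRepeat "AC" na]
        else if j == i then
          r ++ [if i == n - 1 then "*" else "0"]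
        else
          r ++ ["0"]) []
      = (if i == n - 1 then
          List.replicate (n - 1).toNat "0" ++ "*" :: List.replicate 0 "0"
        else
          List.replicate (i + 1).toNat "0"
            ++ pvStrRepeat "AC" na :: List.replicate (n - i - 2).toNat "0") := by
  have hfun : (fun (r : List String) j =>
      if j == i + 1 then
        r ++ [pvStrRepeat "AC" na]
      else if j == i then
        r ++ [if i == n - 1 then "*" else "0"]
      else
        r ++ ["0"])
      = (fun (r : List String) j => r ++ [if j == i + 1 then pvStrRepeat "AC" na
          else if j == i then (if i == n - 1 then "*" else "0") else "0"]) := by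
    funext r j
    split_ifs <;> rfl
  rw [hfun, PySem.List.foldl_append_singleton_eq_map, List.nil_append, PySem.List.pyRange_one]
  by_cases hni : i = n - 1
  · have hb : (i == n - 1) = true := beq_iff_eq.mpr hni
    simp only [hb, if_true]
    apply List.ext_getElem
    · simp only [List.length_map, List.length_range, List.length_append, List.length_cons,
        List.length_replicate]
      omega
    · intro k h1 h2
      simp only [List.length_map, List.length_range] at h1
      rw [pv_getElem_pat _ _ _ _ _ (by
        simp only [List.length_append, List.length_cons, List.length_replicate] at h2
        omega)]
      simp only [List.getElem_map, List.getElem_range, zero_add, beq_iff_eq]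
      split_ifs <;> first | rfl | omega
  · have hb : (i == n - 1) = false := beq_eq_false_iff_ne.mpr hni
    simp only [hb, if_false, Bool.false_eq_true]
    apply List.ext_getElem
    · simp only [List.length_map, List.length_range, List.length_append, List.length_cons,
        List.length_replicate]
      omega
    · intro k h1 h2
      simp only [List.length_map, List.length_range] at h1
      rw [pv_getElem_pat _ _ _ _ _ (by
        simp only [List.length_append, List.length_cons, List.length_replicate] at h2
        omega)]
      simp only [List.getElem_map, List.getElem_range, zero_add, beq_iff_eq]
      split_ifs <;> first | rfl | omega

-- Joining that row with spaces gives B's closed-form row string.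
theorem pv_trans_row_str (n na i : Int) (h0 : 0 ≤ i) (hin : i < n) :
    PySem.Str.join " " ((PySem.List.pyRange 0 n 1).foldl (fun r j =>
        if j == i + 1 then
          r ++ [pvStrRepeat "AC" na]
        else if j == i then
          r ++ [if i == n - 1 then "*" else "0"]
        else
          r ++ ["0"]) [])
      = pvTransRow n na i := by
  rw [pv_trans_row_list n na i h0 hin]
  apply String.toList_inj.mp
  unfold pvTransRow
  by_cases hni : i = n - 1
  · have hb : (i == n - 1) = true := beq_iff_eq.mpr hni
    simp only [hb, if_true]
    rw [PySem.Str.toList_join, List.map_append, List.map_replicate, List.map_cons,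
        List.map_replicate, pv_join_rep_prefix, pv_join_cons_rep]
    simp only [List.replicate_zero, List.flatten_nil, List.append_nil]
    rw [String.toList_append, pv_toList_pvStrRepeat]
    have : i.toNat = (n - 1).toNat := by omega
    rw [this]
    rfl
  · have hb : (i == n - 1) = false := beq_eq_false_iff_ne.mpr hni
    simp only [hb, if_false, Bool.false_eq_true]
    rw [PySem.Str.toList_join, List.map_append, List.map_replicate, List.map_cons,
        List.map_replicate, pv_join_rep_prefix, pv_join_cons_rep]
    rw [String.toList_append, String.toList_append, pv_toList_pvStrRepeat,
        pv_toList_pvStrRepeat, pv_toList_pvStrRepeat, List.append_assoc]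
    rfl

-- A's transition loop = map of B's closed-form rows.
theorem pv_trans_lists (n na : Int) :
    (PySem.List.pyRange 0 n 1).foldl (fun acc i =>
        acc ++ [PySem.Str.join " " ((PySem.List.pyRange 0 n 1).foldl (fun r j =>
            if j == i + 1 then
              r ++ [pvStrRepeat "AC" na]
            else if j == i then
              r ++ [if i == n - 1 then "*" else "0"]
            else
              r ++ ["0"]) [])]) []
      = (PySem.List.pyRange 0 n 1).map (pvTransRow n na) := by
  rw [PySem.List.foldl_append_singleton_eq_map, List.nil_append]
  apply List.map_congr_left
  intro i hi
  rw [PySem.List.mem_pyRange_one] at hi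
  exact pv_trans_row_str n na i hi.1 hi.2

-- A's inner labelling loop joined = B's template row, for a state with the right flags.
theorem pv_label_row_str (props : List String) (n i : Int) (dp : Bool)
    (_h0 : 0 ≤ i) (hin : i < n) :
    PySem.Str.join " " (props.foldl (fun r prop =>
        if prop == "p" then
          (if dp then
            r ++ [if i < n - 1 then "1" else "0"]
          else
            r ++ [if i == 0 || i == n - 1 then "1" else "0"])
        else if prop == "q" then
          r ++ [if i == n - 1 then "1" else "0"]
        else
          r ++ ["0"]) [])
      = pvLabelRow props dp (decide (i = 0)) (decide (i = n - 1)) := by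
  unfold pvLabelRow
  simp only []
  rw [PySem.List.foldl_append_singleton_eq_map, List.nil_append]
  have hlt : (i < n - 1) = ¬ (i = n - 1) := by
    apply propext; omega
  have hfunA : (fun (r : List String) prop =>
      if prop == "p" then
        (if dp then
          r ++ [if i < n - 1 then "1" else "0"]
        else
          r ++ [if i == 0 || i == n - 1 then "1" else "0"])
      else if prop == "q" then
        r ++ [if i == n - 1 then "1" else "0"]
      else
        r ++ ["0"])
      = (fun (r : List String) prop => r ++ [if (if prop == "p" then
            (if dp then !(decide (i = n - 1)) else (decide (i = 0) || decide (i = n - 1)))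
          else if prop == "q" then decide (i = n - 1)
          else false) then "1" else "0"]) := by
    funext r prop
    by_cases hp : prop == "p" <;> by_cases hq : prop == "q" <;> cases dp <;>
      by_cases h0' : i = 0 <;> by_cases hlast : i = n - 1 <;>
      simp [hp, hq, h0', hlast, hlt, beq_iff_eq] <;>
      (split_ifs <;> first | rfl | omega)
  rw [hfunA, PySem.List.foldl_append_singleton_eq_map, List.nil_append]

-- A's labelling loop = B's first/middle/last template structure.
theorem pv_label_lists (props : List String) (n : Int) (dp : Bool) :
    (PySem.List.pyRange 0 n 1).foldl (fun acc i =>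
        acc ++ [PySem.Str.join " " (props.foldl (fun r prop =>
            if prop == "p" then
              (if dp then
                r ++ [if i < n - 1 then "1" else "0"]
              else
                r ++ [if i == 0 || i == n - 1 then "1" else "0"])
            else if prop == "q" then
              r ++ [if i == n - 1 then "1" else "0"]
            else
              r ++ ["0"]) [])]) []
      = (if n ≤ 0 then []
         else if n == 1 then [pvLabelRow props dp true true]
         else [pvLabelRow props dp true false]
              ++ PySem.List.pyRepeat [pvLabelRow props dp false false] (n - 2)
              ++ [pvLabelRow props dp false true]) := by
  rw [PySem.List.foldl_append_singleton_eq_map, List.nil_append]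
  rw [PySem.List.pyRange_one, List.map_map, PySem.List.pyRepeat_singleton]
  by_cases hn0 : n ≤ 0
  · rw [if_pos hn0]
    have : (n - 0).toNat = 0 := by omega
    rw [this]
    rfl
  · rw [if_neg hn0]
    by_cases hn1 : n = 1
    · have hb : (n == 1) = true := beq_iff_eq.mpr hn1
      rw [hb, if_pos rfl]
      subst hn1
      rw [show ((1:Int) - 0).toNat = 1 from rfl, List.range_one, List.map_cons, List.map_nil]
      simp only [Function.comp_apply, Nat.cast_zero, add_zero]
      rw [pv_label_row_str props 1 0 dp (by omega) (by omega)]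
      rw [show decide ((0:Int) = 0) = true from by decide,
          show decide ((0:Int) = 1 - 1) = true from by decide]
    · have hb : (n == 1) = false := beq_eq_false_iff_ne.mpr hn1
      rw [hb]
      simp only [Bool.false_eq_true, if_false]
      rw [List.singleton_append, List.cons_append]
      apply List.ext_getElem
      · simp only [List.length_map, List.length_range, List.length_cons, List.length_append,
          List.length_replicate, List.length_nil]
        omega
      · intro k h1 h2
        simp only [List.length_map, List.length_range] at h1
        simp only [List.getElem_map, List.getElem_range, Function.comp_apply, zero_add]
        rw [pv_label_row_str props n (k : Int) dp (by omega) (by omega)]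
        rcases Nat.eq_zero_or_pos k with hk0 | hk0
        · subst hk0
          rw [List.getElem_cons_zero]
          simp only [Nat.cast_zero, decide_true]
          rw [show decide ((0:Int) = n - 1) = false from by
                simp only [decide_eq_false_iff_not]; omega]
        · rw [List.getElem_cons, dif_neg (by omega)]
          rw [show decide (((k:Nat):Int) = 0) = false from by
            simp only [decide_eq_false_iff_not]
            omega]
          simp only [List.length_cons, List.length_append, List.length_replicate,
            List.length_nil] at h2
          rcases Nat.lt_or_ge (k - 1) ((n - 2).toNat) with hlt2 | hge2
          · rw [List.getElem_append_left (by simpa using hlt2), List.getElem_replicate]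
            rw [show decide (((k:Nat):Int) = n - 1) = false from by
              simp only [decide_eq_false_iff_not]
              omega]
          · rw [List.getElem_append_right (by simpa using hge2), List.getElem_singleton]
            rw [show decide (((k:Nat):Int) = n - 1) = true from by
              simp only [decide_eq_true_eq]
              omega]

theorem pv_strJoin_cons2 (sep a b : String) (l : List String) :
    PySem.Str.join sep (a :: b :: l) = a ++ sep ++ PySem.Str.join sep (b :: l) :=
  pv_strJoin_cons sep a (b :: l) (by simp)

-- ===== VERDICT =====
theorem generate_linear_chain_model_spec : Claim_equal_generate_linear_chain_model := by
  intro num_states num_agents prop_names dense_p _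
  unfold Spec_generate_linear_chain_model generate_linear_chain_model
    generate_linear_chain_model_alt pv_format_cgs_body pv_state_names
    pv_unknown_transitions_grid pvNL
  cases prop_names <;>
    (simp only [pv_trans_lists, pv_label_lists, pv_zero_row, List.cons_append,
       List.nil_append, pv_strJoin_cons2, pv_strJoin_singleton]
     rw [show ("Transition\n" : String) = "Transition" ++ "\n" from by decide,
         show ("Unknown_Transition_by\n" : String) = "Unknown_Transition_by" ++ "\n" from by decide,
         show ("Name_State\n" : String) = "Name_State" ++ "\n" from by decide,
         show ("Initial_State\ns0\n" : String) = "Initial_State" ++ "\n" ++ "s0" ++ "\n" from by decide,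
         show ("Atomic_propositions\n" : String) = "Atomic_propositions" ++ "\n" from by decide,
         show ("Labelling\n" : String) = "Labelling" ++ "\n" from by decide,
         show ("Number_of_agents\n" : String) = "Number_of_agents" ++ "\n" from by decide]
     simp only [String.append_assoc])
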